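-- pv_equiv track=rewrite | github.com/KlimeHertz/doflang | sniffer.py | getCellIdFromHash
-- ===== SOURCE A (Python) =====
-- def getCellIdFromHash(cellCode):
--     char1 = cellCode[0]
--     char2 = cellCode[1]
--
--     carac_array = ['a', 'b', 'c', 'd', 'e', 'f', 'g', 'h', 'i', 'j', 'k', 'l', 'm', 'n', 'o', 'p',
--     'q', 'r', 's', 't', 'u', 'v', 'w', 'x', 'y', 'z', 'A', 'B', 'C', 'D', 'E', 'F',
--     'G', 'H', 'I', 'J', 'K', 'L', 'M', 'N', 'O', 'P', 'Q', 'R', 'S', 'T', 'U', 'V',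
--     'W', 'X', 'Y', 'Z', '0', '1', '2', '3', '4', '5', '6', '7', '8', '9', '-', '_']
--
--     code1 = 0
--     code2 = 0
--     a = 0
--
--     while (a < len(carac_array)):
--
--         if (carac_array[a] == char1):
--             code1 = (a * 64)
--
--         if (carac_array[a] == char2):
--             code2 = a
--
--         a += 1
--     return (code1 + code2)
-- ===== SOURCE B (Python) =====
-- def getCellIdFromHash(cellCode):
--     def idx(c):
--         if 'a' <= c <= 'z':
--             return ord(c) - 97
--         if 'A' <= c <= 'Z':
--             return ord(c) - 65 + 26
--         if '0' <= c <= '9':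
--             return ord(c) - 48 + 52
--         if c == '-':
--             return 62
--         if c == '_':
--             return 63
--         return 0
--     return idx(cellCode[0]) * 64 + idx(cellCode[1])
-- ===== Notes on version B (the rewrite author's own statement) =====
-- stated objective: simpler
-- what changed: Replaced the 64-element table and the while-scan over it by direct ordinal arithmetic on the two characters (range tests plus ord offsets), no table and no loop.
import Mathlib
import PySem

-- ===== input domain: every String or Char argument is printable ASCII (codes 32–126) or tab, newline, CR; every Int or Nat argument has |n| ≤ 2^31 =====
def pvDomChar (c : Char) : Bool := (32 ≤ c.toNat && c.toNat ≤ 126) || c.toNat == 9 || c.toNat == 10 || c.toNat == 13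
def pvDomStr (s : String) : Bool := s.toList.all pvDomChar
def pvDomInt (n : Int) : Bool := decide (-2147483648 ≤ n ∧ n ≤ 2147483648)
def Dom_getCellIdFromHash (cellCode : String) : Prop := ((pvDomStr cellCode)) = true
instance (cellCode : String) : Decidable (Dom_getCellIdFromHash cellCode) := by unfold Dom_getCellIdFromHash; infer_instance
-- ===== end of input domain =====

-- B replaces A's 64-entry table and while-scan by direct ordinal arithmetic on the two
-- characters (simpler; equivalence of the return value is proved on strings of length ≥ 2).

-- ===== PORT A =====
def pvCarac : List Char :=
  ['a', 'b', 'c', 'd', 'e', 'f', 'g', 'h', 'i', 'j', 'k', 'l', 'm', 'n', 'o', 'p',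
   'q', 'r', 's', 't', 'u', 'v', 'w', 'x', 'y', 'z', 'A', 'B', 'C', 'D', 'E', 'F',
   'G', 'H', 'I', 'J', 'K', 'L', 'M', 'N', 'O', 'P', 'Q', 'R', 'S', 'T', 'U', 'V',
   'W', 'X', 'Y', 'Z', '0', '1', '2', '3', '4', '5', '6', '7', '8', '9', '-', '_']

-- cellCode[0] / cellCode[1] raise IndexError on short input: excluded by Pre_ (port returns 0 there).
def getCellIdFromHash (cellCode : String) : Int :=
  match PySem.Str.pyGet? cellCode 0, PySem.Str.pyGet? cellCode 1 with
  | some char1, some char2 =>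
      -- while a < len(carac_array): index a and carac_array[a] traversed together
      let r := (PySem.List.enumerate pvCarac 0).foldl
        (fun (acc : Int × Int) (p : Int × Char) =>
          (if p.2 = char1 then p.1 * 64 else acc.1,
           if p.2 = char2 then p.1 else acc.2)) (0, 0)
      r.1 + r.2
  | _, _ => 0

-- ===== PORT B =====
def pvAltIdx (c : Char) : Int :=
  if 'a' ≤ c ∧ c ≤ 'z' then (c.toNat : Int) - 97
  else if 'A' ≤ c ∧ c ≤ 'Z' then (c.toNat : Int) - 65 + 26
  else if '0' ≤ c ∧ c ≤ '9' then (c.toNat : Int) - 48 + 52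
  else if c = '-' then 62
  else if c = '_' then 63
  else 0

def getCellIdFromHash_alt (cellCode : String) : Int :=
  ((PySem.Str.pyGet? cellCode 0).map pvAltIdx).getD 0 * 64 +
  ((PySem.Str.pyGet? cellCode 1).map pvAltIdx).getD 0

-- ===== PRECONDITION & SPEC =====
-- Pre_ excludes strings of length < 2, on which the Python A raises IndexError.
def Pre_getCellIdFromHash (cellCode : String) : Prop := 2 ≤ cellCode.toList.length
instance (cellCode : String) : Decidable (Pre_getCellIdFromHash cellCode) := by
  unfold Pre_getCellIdFromHash; infer_instance

def pvWitness_getCellIdFromHash : String := "ab"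

def Spec_getCellIdFromHash (cellCode : String) (out : Int) : Prop := out = getCellIdFromHash_alt cellCode
instance (cellCode : String) (out : Int) : Decidable (Spec_getCellIdFromHash cellCode out) := by unfold Spec_getCellIdFromHash; infer_instance

-- ===== CLAIM (what is proved, stated in full; the proofs are below) =====
def Claim_equal_getCellIdFromHash : Prop := ∀ (cellCode : String), Dom_getCellIdFromHash cellCode → Pre_getCellIdFromHash cellCode → Spec_getCellIdFromHash cellCode (getCellIdFromHash cellCode)

-- ===== LEMMAS AND PROOFS =====

-- the two components of A's loop state evolve independently
theorem pv_foldl_pair (l : List (Int × Char)) (c1 c2 : Char) (x y : Int) :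
    l.foldl (fun (acc : Int × Int) (p : Int × Char) =>
        (if p.2 = c1 then p.1 * 64 else acc.1,
         if p.2 = c2 then p.1 else acc.2)) (x, y)
    = (l.foldl (fun (a : Int) (p : Int × Char) => if p.2 = c1 then p.1 * 64 else a) x,
       l.foldl (fun (a : Int) (p : Int × Char) => if p.2 = c2 then p.1 else a) y) := by
  induction l generalizing x y with
  | nil => rfl
  | cons h t ih => simp only [List.foldl_cons]; exact ih _ _

-- A's scan of the table computes pvAltIdx, for every character in the ASCII domain
set_option maxRecDepth 20000 in
theorem pv_scan2_eq (c : Char) (h : pvDomChar c = true) :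
    (PySem.List.enumerate pvCarac 0).foldl
      (fun (a : Int) (p : Int × Char) => if p.2 = c then p.1 else a) 0 = pvAltIdx c := by
  have hb : c.toNat < 127 := by
    simp only [pvDomChar, Bool.or_eq_true, Bool.and_eq_true, decide_eq_true_eq,
      beq_iff_eq] at h; omega
  have hc : Char.ofNat c.toNat = c := Char.ofNat_toNat c
  have key : ∀ n : Nat, n < 127 →
      (PySem.List.enumerate pvCarac 0).foldl
        (fun (a : Int) (p : Int × Char) => if p.2 = Char.ofNat n then p.1 else a) 0
      = pvAltIdx (Char.ofNat n) := by decide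
  have := key c.toNat hb
  rwa [hc] at this

set_option maxRecDepth 20000 in
theorem pv_scan1_eq (c : Char) (h : pvDomChar c = true) :
    (PySem.List.enumerate pvCarac 0).foldl
      (fun (a : Int) (p : Int × Char) => if p.2 = c then p.1 * 64 else a) 0 = pvAltIdx c * 64 := by
  have hb : c.toNat < 127 := by
    simp only [pvDomChar, Bool.or_eq_true, Bool.and_eq_true, decide_eq_true_eq,
      beq_iff_eq] at h; omega
  have hc : Char.ofNat c.toNat = c := Char.ofNat_toNat c
  have key : ∀ n : Nat, n < 127 →
      (PySem.List.enumerate pvCarac 0).foldl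
        (fun (a : Int) (p : Int × Char) => if p.2 = Char.ofNat n then p.1 * 64 else a) 0
      = pvAltIdx (Char.ofNat n) * 64 := by decide
  have := key c.toNat hb
  rwa [hc] at this

-- ===== VERDICT (by name: the statement is the Claim_ definition above) =====
theorem getCellIdFromHash_spec : Claim_equal_getCellIdFromHash := by
  intro cellCode hdom hpre
  unfold Spec_getCellIdFromHash
  rcases hl : cellCode.toList with _ | ⟨c1, t⟩
  · exact absurd hpre (by simp [Pre_getCellIdFromHash, hl])
  rcases t with _ | ⟨c2, rest⟩
  · exact absurd hpre (by simp [Pre_getCellIdFromHash, hl])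
  have hd : pvDomChar c1 = true ∧ pvDomChar c2 = true := by
    have := hdom
    simp [Dom_getCellIdFromHash, pvDomStr, hl] at this
    exact ⟨this.1, this.2.1⟩
  have h0 : PySem.Str.pyGet? cellCode 0 = some c1 := by
    simp [PySem.Str.pyGet?_eq, hl, PySem.List.pyGet?, PySem.List.pyIdx?]
    rw [if_pos (by positivity)]; rfl
  have h1 : PySem.Str.pyGet? cellCode 1 = some c2 := by
    simp [PySem.Str.pyGet?_eq, hl, PySem.List.pyGet?, PySem.List.pyIdx?]
  simp only [getCellIdFromHash, getCellIdFromHash_alt, h0, h1, Option.map_some,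
    Option.getD_some]
  rw [pv_foldl_pair, pv_scan1_eq c1 hd.1, pv_scan2_eq c2 hd.2]
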